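-- pv_equiv track=rewrite | github.com/Issac-Westcott/copy_paste_tool | utils/image_tools.py | is_overlap
-- ===== SOURCE A (Python) =====
-- def is_overlap(box1, box2):
--     for coord1 in box1:
--         for coord2 in box2:
--             x1_min, y1_min, x1_max, y1_max = min(coord1[0::2]), min(coord1[1::2]), max(coord1[0::2]), max(coord1[1::2])
--             x2_min, y2_min, x2_max, y2_max = min(coord2[0::2]), min(coord2[1::2]), max(coord2[0::2]), max(coord2[1::2])
--             if not (x1_max < x2_min or x1_min > x2_max or y1_max < y2_min or y1_min > y2_max):
--                 return True
--     return False
-- ===== SOURCE B (Python) =====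
-- def is_overlap(box1, box2):
--     def rect(c):
--         xs, ys = c[0::2], c[1::2]
--         return (min(xs), min(ys), max(xs), max(ys))
--     rects1 = [rect(c) for c in box1]
--     rects2 = sorted((rect(c) for c in box2), key=lambda r: r[0])
--     for ax0, ay0, ax1, ay1 in rects1:
--         for bx0, by0, bx1, by1 in rects2:
--             if bx0 > ax1:
--                 break
--             if bx1 >= ax0 and by0 <= ay1 and by1 >= ay0:
--                 return True
--     return False
-- ===== Notes on version B (the rewrite author's own statement) =====
-- stated objective: alternative
-- what changed: B precomputes each polygon's bounding box once (A recomputes both boxes' min/max slices inside the nested loop for every pair), sorts box2's rectangles by x_min, and scans them with an early break once x_min exceeds the current rectangle's x_max; it trades A's lazy per-pair evaluation for up-front bbox construction.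
-- outside the precondition, e.g. on is_overlap([], [[5]]): A returns False, B raises ValueError; on is_overlap([[0, 1, 2, 3], [7]], [[0, 1, 2, 3]]): A returns True, B raises ValueError
import Mathlib
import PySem

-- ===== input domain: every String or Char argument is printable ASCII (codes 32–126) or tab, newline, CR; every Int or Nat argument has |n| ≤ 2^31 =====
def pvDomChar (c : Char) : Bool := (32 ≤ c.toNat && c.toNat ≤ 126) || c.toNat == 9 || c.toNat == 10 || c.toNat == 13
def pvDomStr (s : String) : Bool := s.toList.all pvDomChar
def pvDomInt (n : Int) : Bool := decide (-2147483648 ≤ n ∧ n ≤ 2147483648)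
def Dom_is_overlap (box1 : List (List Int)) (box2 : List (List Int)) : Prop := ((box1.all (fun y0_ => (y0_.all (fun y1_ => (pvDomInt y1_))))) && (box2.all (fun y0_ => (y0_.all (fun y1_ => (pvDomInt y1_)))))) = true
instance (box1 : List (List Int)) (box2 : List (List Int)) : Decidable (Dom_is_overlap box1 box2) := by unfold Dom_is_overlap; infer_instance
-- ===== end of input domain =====

-- Alternative algorithm: B computes each bounding box once up front and scans box2's
-- rectangles sorted by x_min with an early break (A recomputes both min/max slices per pair).

-- ===== PORT A =====
-- A: nested for with 'return True' = nested List.any; the eight min/max of the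
-- even/odd slices are recomputed inline for every pair, exactly as in the Python.
def is_overlap (box1 : List (List Int)) (box2 : List (List Int)) : Bool :=
  box1.any (fun coord1 => box2.any (fun coord2 =>
    let x1_min := (PySem.List.min? ((PySem.List.slice? coord1 (some 0) none 2).getD []) (fun x => x)).getD 0
    let y1_min := (PySem.List.min? ((PySem.List.slice? coord1 (some 1) none 2).getD []) (fun x => x)).getD 0
    let x1_max := (PySem.List.max? ((PySem.List.slice? coord1 (some 0) none 2).getD []) (fun x => x)).getD 0
    let y1_max := (PySem.List.max? ((PySem.List.slice? coord1 (some 1) none 2).getD []) (fun x => x)).getD 0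
    let x2_min := (PySem.List.min? ((PySem.List.slice? coord2 (some 0) none 2).getD []) (fun x => x)).getD 0
    let y2_min := (PySem.List.min? ((PySem.List.slice? coord2 (some 1) none 2).getD []) (fun x => x)).getD 0
    let x2_max := (PySem.List.max? ((PySem.List.slice? coord2 (some 0) none 2).getD []) (fun x => x)).getD 0
    let y2_max := (PySem.List.max? ((PySem.List.slice? coord2 (some 1) none 2).getD []) (fun x => x)).getD 0
    !(decide (x1_max < x2_min) || decide (x1_min > x2_max) || decide (y1_max < y2_min) || decide (y1_min > y2_max))))

-- ===== PORT B =====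
-- rect(c) of Source B (min/max of the even/odd-index slices; .getD 0 stands where Python raises, excluded by Pre_)
def rectB (c : List Int) : Int × Int × Int × Int :=
  let xs := (PySem.List.slice? c (some 0) none 2).getD []
  let ys := (PySem.List.slice? c (some 1) none 2).getD []
  ((PySem.List.min? xs (fun x => x)).getD 0,
   (PySem.List.min? ys (fun x => x)).getD 0,
   (PySem.List.max? xs (fun x => x)).getD 0,
   (PySem.List.max? ys (fun x => x)).getD 0)

-- inner 'for … break / return True' loop of Source B over the sorted rectangles
def scanB (a : Int × Int × Int × Int) : List (Int × Int × Int × Int) → Bool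
  | [] => false
  | b :: t =>
    if b.1 > a.2.2.1 then false
    else if b.2.2.1 ≥ a.1 && b.2.1 ≤ a.2.2.2 && b.2.2.2 ≥ a.2.1 then true
    else scanB a t

def is_overlap_alt (box1 : List (List Int)) (box2 : List (List Int)) : Bool :=
  let rects1 := box1.map rectB
  let rects2 := PySem.List.sorted (box2.map rectB) (fun r => r.1) false
  rects1.any (fun a => scanB a rects2)

-- ===== PRECONDITION & SPEC =====
-- Pre_ excludes any polygon with fewer than 2 coordinates: min()/max() of an empty slice
-- raises ValueError in Python (A raises where it reaches such a polygon; B always does).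
def Pre_is_overlap (box1 : List (List Int)) (box2 : List (List Int)) : Prop :=
  (∀ c ∈ box1, 2 ≤ c.length) ∧ (∀ c ∈ box2, 2 ≤ c.length)
instance (box1 : List (List Int)) (box2 : List (List Int)) : Decidable (Pre_is_overlap box1 box2) := by unfold Pre_is_overlap; infer_instance

def pvWitness_is_overlap : List (List Int) × List (List Int) := ([[0, 0, 2, 2]], [[1, 1, 3, 3]])

def Spec_is_overlap (box1 : List (List Int)) (box2 : List (List Int)) (out : Bool) : Prop := out = is_overlap_alt box1 box2
instance (box1 : List (List Int)) (box2 : List (List Int)) (out : Bool) : Decidable (Spec_is_overlap box1 box2 out) := by unfold Spec_is_overlap; infer_instance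

-- ===== CLAIM (what is proved, stated in full; the proofs are below) =====
def Claim_equal_is_overlap : Prop := ∀ (box1 : List (List Int)) (box2 : List (List Int)), Dom_is_overlap box1 box2 → Pre_is_overlap box1 box2 → Spec_is_overlap box1 box2 (is_overlap box1 box2)

-- ===== LEMMAS AND PROOFS =====

-- the pairwise overlap test, on precomputed rectangles
def hitQ (a b : Int × Int × Int × Int) : Bool :=
  !(decide (a.2.2.1 < b.1) || decide (a.1 > b.2.2.1) || decide (a.2.2.2 < b.2.1) || decide (a.2.1 > b.2.2.2))

-- on an x_min-sorted list, the broken scan agrees with the full any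
lemma scanB_eq_any (a : Int × Int × Int × Int) (l : List (Int × Int × Int × Int))
    (h : l.Pairwise (fun p q => p.1 ≤ q.1)) : scanB a l = l.any (hitQ a) := by
  induction l with
  | nil => rfl
  | cons b t ih =>
    rcases List.pairwise_cons.mp h with ⟨hb, ht⟩
    simp only [scanB, List.any_cons]
    by_cases hx : b.1 > a.2.2.1
    · simp only [if_pos hx]
      have h1 : hitQ a b = false := by simp [hitQ]; omega
      have h2 : t.any (hitQ a) = false := by
        rw [List.any_eq_false]
        intro q hq
        have := hb q hq
        simp [hitQ]; omega
      simp [h1, h2]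
    · simp only [if_neg hx]
      rw [ih ht]
      by_cases hc : (b.2.2.1 ≥ a.1 && b.2.1 ≤ a.2.2.2 && b.2.2.2 ≥ a.2.1) = true
      · have hq : hitQ a b = true := by
          simp only [Bool.and_eq_true, decide_eq_true_eq, ge_iff_le] at hc
          simp [hitQ]; omega
        simp [hc, hq]
      · have hq : hitQ a b = false := by
          simp only [Bool.and_eq_true, decide_eq_true_eq, ge_iff_le] at hc
          simp [hitQ]; omega
        simp [hc, hq]

-- ===== VERDICT (by name: the statement is the Claim_ definition above) =====
theorem is_overlap_spec : Claim_equal_is_overlap := by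
  intro box1 box2 _ _
  unfold Spec_is_overlap is_overlap is_overlap_alt
  simp only []
  have hsorted := PySem.List.sorted_pairwise (box2.map rectB) (fun r => r.1)
  have hperm := PySem.List.sorted_perm (box2.map rectB) (fun r => r.1) false
  rw [List.any_map]
  apply PySem.List.any_congr_mem
  intro c1 _
  simp only [Function.comp_apply]
  rw [scanB_eq_any _ _ hsorted, hperm.any_eq, List.any_map]
  apply PySem.List.any_congr_mem
  intro c2 _
  simp only [Function.comp_apply]
  rfl
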